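-- pv_equiv track=rewrite | github.com/clld/clld | src/clld/web/util/helpers.py | partitioned
-- ===== SOURCE A (Python) =====
-- def partitioned(items, n=3):
--     """Partition items into n buckets."""
--     max_items_per_bucket, rem = divmod(len(items), n)
--     if rem:
--         max_items_per_bucket += 1
--     bucket = []
--
--     for item in items:
--         if len(bucket) >= max_items_per_bucket:
--             yield bucket
--             bucket = []
--         bucket.append(item)
--
--     yield bucket
-- ===== SOURCE B (Python) =====
-- def partitioned(items, n=3):
--     """Partition items into n buckets."""
--     items = list(items)
--     if not items:
--         yield []
--         return
--     size = -(-len(items) // n)  # ceil(len/n) for positive n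
--     for i in range(0, len(items), size):
--         yield items[i:i + size]
-- ===== Notes on version B (the rewrite author's own statement) =====
-- stated objective: simpler
-- what changed: B replaces A's accumulate-and-flush bucket loop with computed slice boundaries: ceiling-division bucket size once, then items[i:i+size] for i in range(0, len, size).
-- outside the precondition, e.g. on partitioned([1, 2], -1): A returns [[], [1], [2]], B returns []
import Mathlib
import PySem

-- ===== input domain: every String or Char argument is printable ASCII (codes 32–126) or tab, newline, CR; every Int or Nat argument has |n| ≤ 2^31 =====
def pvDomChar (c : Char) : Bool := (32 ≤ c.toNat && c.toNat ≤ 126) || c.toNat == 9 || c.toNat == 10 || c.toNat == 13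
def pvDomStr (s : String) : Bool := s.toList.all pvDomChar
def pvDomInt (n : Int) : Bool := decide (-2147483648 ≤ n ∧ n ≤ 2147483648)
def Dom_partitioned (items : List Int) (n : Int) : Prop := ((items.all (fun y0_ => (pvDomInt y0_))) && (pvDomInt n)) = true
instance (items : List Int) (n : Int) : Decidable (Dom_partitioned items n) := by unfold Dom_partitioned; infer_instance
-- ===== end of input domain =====

-- B replaces A's accumulate-and-flush bucket loop with computed slice boundaries (simpler); both are generators, compared as the list of yielded buckets.

-- ===== PORT A =====
def partitioned (items : List Int) (n : Int) : List (List Int) :=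
  match PySem.Int.divmod? (items.length : Int) n with
  | none => []  -- n = 0: ZeroDivisionError in Python (excluded by Pre_)
  | some qr =>
    let size : Int := if qr.2 ≠ 0 then qr.1 + 1 else qr.1
    let st := items.foldl
      (fun (st : List (List Int) × List Int) item =>
        if (st.2.length : Int) ≥ size then (st.1 ++ [st.2], [item]) else (st.1, st.2 ++ [item]))
      ([], [])
    st.1 ++ [st.2]

-- ===== PORT B =====
def partitioned_alt (items : List Int) (n : Int) : List (List Int) :=
  if items = [] then [[]]
  else if n = 0 then []  -- ZeroDivisionError in Python (excluded by Pre_)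
  else
    let size : Int := -(PySem.Int.floordiv (-(items.length : Int)) n)
    (PySem.List.pyRange 0 (items.length : Int) size).map
      (fun i => PySem.List.slice items (some i) (some (i + size)))

-- ===== PRECONDITION & SPEC =====
-- Pre_ restricts to positive bucket counts, the function's natural domain: at n = 0 A raises
-- ZeroDivisionError, and for n < 0 A's bucket size goes negative, returning an accidental
-- leading empty bucket followed by singleton buckets (B's natural slicing yields no buckets there).
def Pre_partitioned (items : List Int) (n : Int) : Prop := 0 < n
instance (items : List Int) (n : Int) : Decidable (Pre_partitioned items n) := by
  unfold Pre_partitioned; infer_instance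

def pvWitness_partitioned : List Int × Int := ([1, 2, 3], 2)

def Spec_partitioned (items : List Int) (n : Int) (out : List (List Int)) : Prop := out = partitioned_alt items n
instance (items : List Int) (n : Int) (out : List (List Int)) : Decidable (Spec_partitioned items n out) := by unfold Spec_partitioned; infer_instance

-- ===== CLAIM (what is proved, stated in full; the proofs are below) =====
def Claim_equal_partitioned : Prop := ∀ (items : List Int) (n : Int), Dom_partitioned items n → Pre_partitioned items n → Spec_partitioned items n (partitioned items n)

-- ===== LEMMAS AND PROOFS =====

-- A's loop, as a recursion on the remaining items with the current bucket.
def aRun (s : Int) (b : List Int) : List Int → List (List Int)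
  | [] => [b]
  | x :: xs => if (b.length : Int) ≥ s then b :: aRun s [x] xs else aRun s (b ++ [x]) xs

-- Chunks of size s+1 of a list (empty list ↦ no chunks).
def chunks (s : Nat) : List Int → List (List Int)
  | [] => []
  | x :: xs => (x :: xs.take s) :: chunks s (xs.drop s)
  termination_by l => l.length
  decreasing_by simp

theorem chunks_nil (s : Nat) : chunks s [] = [] := by rw [chunks]
theorem chunks_cons (s : Nat) (x : Int) (xs : List Int) :
    chunks s (x :: xs) = (x :: xs.take s) :: chunks s (xs.drop s) := by rw [chunks]

theorem foldl_eq_aRun (s : Int) (l : List Int) (acc : List (List Int)) (b : List Int) :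
    (l.foldl
      (fun (st : List (List Int) × List Int) item =>
        if (st.2.length : Int) ≥ s then (st.1 ++ [st.2], [item]) else (st.1, st.2 ++ [item]))
      (acc, b)).1 ++
    [(l.foldl
      (fun (st : List (List Int) × List Int) item =>
        if (st.2.length : Int) ≥ s then (st.1 ++ [st.2], [item]) else (st.1, st.2 ++ [item]))
      (acc, b)).2] = acc ++ aRun s b l := by
  induction l generalizing acc b with
  | nil => simp [aRun]
  | cons x xs ih =>
    simp only [List.foldl_cons, aRun]
    by_cases h : (b.length : Int) ≥ s
    · simp only [h, if_pos]
      rw [ih]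
      simp
    · simp only [h, if_neg, if_false]
      rw [ih]

theorem aRun_eq_chunks (s : Nat) (l : List Int) : ∀ (b : List Int),
    1 ≤ b.length → b.length ≤ s + 1 →
    aRun ((s : Int) + 1) b l = (b ++ l.take (s + 1 - b.length)) :: chunks s (l.drop (s + 1 - b.length)) := by
  induction l with
  | nil => intro b h1 h2; simp [aRun, chunks_nil]
  | cons x xs ih =>
    intro b h1 h2
    by_cases hfull : b.length = s + 1
    · have hge : ((b.length : Nat) : Int) ≥ (s : Int) + 1 := by omega
      simp only [aRun, hge, if_pos]
      rw [ih [x] (by simp) (by simp)]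
      simp only [hfull, List.length_cons, List.length_nil, Nat.sub_self, Nat.zero_add,
        Nat.add_sub_cancel, List.take_zero, List.drop_zero, List.append_nil]
      rw [chunks_cons]
      simp
    · have hlt : b.length ≤ s := by omega
      have hnge : ¬ (((b.length : Nat) : Int) ≥ (s : Int) + 1) := by omega
      simp only [aRun, hnge, if_false]
      rw [ih (b ++ [x]) (by simp) (by simp only [List.length_append, List.length_cons, List.length_nil]; omega)]
      have hk : s + 1 - b.length = (s - b.length) + 1 := by omega
      rw [hk]
      simp only [List.take_succ_cons, List.drop_succ_cons, List.length_append,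
        List.length_cons, List.length_nil]
      have : s + 1 - (b.length + 0 + 1) = s - b.length := by omega
      rw [this]
      simp

-- chunks as a map over chunk indices, for the right chunk count m.
theorem map_range_eq_chunks (s : Nat) : ∀ (m : Nat) (l : List Int),
    l.length ≤ (s + 1) * m → (s + 1) * m < l.length + (s + 1) →
    (List.range m).map (fun j => (l.drop ((s + 1) * j)).take (s + 1)) = chunks s l := by
  intro m
  induction m with
  | zero =>
    intro l h1 h2
    have : l = [] := by
      cases l with
      | nil => rfl
      | cons a as => simp at h1
    subst this; simp [chunks_nil]
  | succ m ih =>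
    intro l h1 h2
    have hmul : (s + 1) * (m + 1) = (s + 1) * m + (s + 1) := by ring
    rw [hmul] at h1 h2
    have hpos : 0 < l.length := by
      have := Nat.zero_le ((s + 1) * m)
      omega
    obtain ⟨x, xs, rfl⟩ : ∃ x xs, l = x :: xs := by
      cases l with
      | nil => simp at hpos
      | cons a as => exact ⟨a, as, rfl⟩
    rw [List.range_succ_eq_map]
    simp only [List.map_cons, List.map_map, Nat.mul_zero, List.drop_zero]
    have hmap : (List.range m).map ((fun j => ((x :: xs).drop ((s + 1) * j)).take (s + 1)) ∘ Nat.succ)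
        = (List.range m).map (fun j => (((x :: xs).drop (s + 1)).drop ((s + 1) * j)).take (s + 1)) := by
      apply List.map_congr_left
      intro j _
      simp only [Function.comp]
      rw [show Nat.succ j = j + 1 from rfl]
      rw [List.drop_drop]
      congr 2
      ring
    rw [hmap, ih ((x :: xs).drop (s + 1)) (by simp only [List.length_drop, List.length_cons] at h1 h2 ⊢; omega) (by simp only [List.length_drop, List.length_cons] at h1 h2 ⊢; omega)]
    show ((x :: xs).take (s + 1)) :: _ = chunks s (x :: xs)
    rw [chunks_cons]
    simp

-- The ceiling size computed by A (via divmod) for 0 < n.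
theorem a_size_ceil (L n : Int) (hn : 0 < n) (hL : 0 ≤ L) :
    (if PySem.Int.mod L n ≠ 0 then PySem.Int.floordiv L n + 1 else PySem.Int.floordiv L n) * n ≥ L ∧
    ((if PySem.Int.mod L n ≠ 0 then PySem.Int.floordiv L n + 1 else PySem.Int.floordiv L n) - 1) * n < L := by
  rw [PySem.Int.floordiv_eq_ediv_of_pos hn, PySem.Int.mod_eq_emod_of_pos hn]
  have hdm := Int.ediv_add_emod L n
  have hr0 : 0 ≤ L % n := Int.emod_nonneg L (by omega)
  have hrn : L % n < n := Int.emod_lt_of_pos L hn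
  have e1 : (L / n + 1) * n = n * (L / n) + n := by ring
  have e2 : (L / n + 1 - 1) * n = n * (L / n) := by ring
  have e3 : (L / n) * n = n * (L / n) := by ring
  have e4 : (L / n - 1) * n = n * (L / n) - n := by ring
  by_cases hr : L % n = 0
  · rw [if_neg (fun h => h hr)]
    constructor
    · rw [ge_iff_le, e3]; linarith
    · rw [e4]; linarith
  · rw [if_pos hr]
    have hr1 : 0 < L % n := lt_of_le_of_ne hr0 (fun h => hr h.symm)
    constructor
    · rw [ge_iff_le, e1]; linarith
    · rw [e2]; linarith

-- B's ceiling division agrees with A's size.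
theorem b_size_eq (L n : Int) (hn : 0 < n) (hL : 0 ≤ L) :
    -(PySem.Int.floordiv (-L) n) =
      (if PySem.Int.mod L n ≠ 0 then PySem.Int.floordiv L n + 1 else PySem.Int.floordiv L n) := by
  obtain ⟨h1, h2⟩ := a_size_ceil L n hn hL
  rw [PySem.Int.neg_floordiv_neg_eq_iff_of_pos hn]
  exact ⟨h2, h1⟩

-- B's pyRange/slice map is the chunks function, for nonempty l and size s+1.
theorem b_map_eq_chunks (s : Nat) (l : List Int) (hne : l ≠ []) :
    (PySem.List.pyRange 0 (l.length : Int) ((s : Int) + 1)).map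
      (fun i => PySem.List.slice l (some i) (some (i + ((s : Int) + 1)))) = chunks s l := by
  have hk : (0 : Int) < (s : Int) + 1 := by omega
  have hL : (0 : Int) < (l.length : Int) := by
    cases l with
    | nil => simp at hne
    | cons a as => simp
  rw [PySem.List.pyRange_of_pos 0 (l.length : Int) hk]
  simp only [hL, if_pos, sub_zero, zero_add]
  set N : Int := (((l.length : Int) + ((s : Int) + 1) - 1) / ((s : Int) + 1)) with hN
  have hdm := Int.ediv_add_emod ((l.length : Int) + ((s : Int) + 1) - 1) ((s : Int) + 1)
  rw [← hN] at hdm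
  have hr0 : 0 ≤ ((l.length : Int) + ((s : Int) + 1) - 1) % ((s : Int) + 1) :=
    Int.emod_nonneg _ (by omega)
  have hrn : ((l.length : Int) + ((s : Int) + 1) - 1) % ((s : Int) + 1) < (s : Int) + 1 :=
    Int.emod_lt_of_pos _ hk
  have hub : (l.length : Int) ≤ ((s : Int) + 1) * N := by linarith
  have hlb : ((s : Int) + 1) * N < (l.length : Int) + ((s : Int) + 1) := by linarith
  have hN0 : 0 ≤ N := by
    rw [hN]
    exact Int.ediv_nonneg (by omega) (by omega)
  have hNt : (N.toNat : Int) = N := Int.toNat_of_nonneg hN0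
  have hmap : ((List.range N.toNat).map (fun (k : Nat) => ((s : Int) + 1) * (k : Int))).map
      (fun i => PySem.List.slice l (some i) (some (i + ((s : Int) + 1))))
      = (List.range N.toNat).map (fun j => (l.drop ((s + 1) * j)).take (s + 1)) := by
    rw [List.map_map]
    apply List.map_congr_left
    intro j _
    simp only [Function.comp]
    have h1 : ((s : Int) + 1) * (j : Int) = (((s + 1) * j : Nat) : Int) := by push_cast; ring
    rw [h1]
    have h2 : ((((s + 1) * j : Nat) : Int) + ((s : Int) + 1)) = (((s + 1) * j : Nat) : Int) + (((s + 1) : Nat) : Int) := by push_cast; ring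
    rw [h2, PySem.List.slice_natCast_add l ((s + 1) * j) (s + 1)]
  rw [hmap]
  apply map_range_eq_chunks
  · have : ((((s + 1) * N.toNat : Nat)) : Int) = ((s : Int) + 1) * N := by push_cast [hNt]; ring
    omega
  · have : ((((s + 1) * N.toNat : Nat)) : Int) = ((s : Int) + 1) * N := by push_cast [hNt]; ring
    omega

-- ===== VERDICT (by name: the statement is the Claim_ definition above) =====
theorem partitioned_spec : Claim_equal_partitioned := by
  intro items n _ hpre
  unfold Spec_partitioned partitioned partitioned_alt
  have hp : (0 : Int) < n := hpre
  have hn0 : n ≠ 0 := by omega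
  have hdm : PySem.Int.divmod? (items.length : Int) n
      = some (PySem.Int.floordiv (items.length : Int) n, PySem.Int.mod (items.length : Int) n) := by
    simp [PySem.Int.divmod?, PySem.Int.floordiv, PySem.Int.mod, hn0]
  rw [hdm]
  simp only [hn0, if_neg, if_false]
  set S : Int := if PySem.Int.mod (items.length : Int) n ≠ 0
      then PySem.Int.floordiv (items.length : Int) n + 1
      else PySem.Int.floordiv (items.length : Int) n with hS
  cases items with
  | nil =>
    simp only [if_pos rfl]
    have : S = 0 := by
      rw [hS]
      simp [PySem.Int.floordiv_eq_ediv_of_pos hpre, PySem.Int.mod_eq_emod_of_pos hpre]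
    simp [this]
  | cons x xs =>
    have hL : (0 : Int) ≤ ((x :: xs).length : Int) := by positivity
    obtain ⟨hub, hlb⟩ := a_size_ceil ((x :: xs).length : Int) n hpre hL
    rw [← hS] at hub hlb
    have hS1 : 1 ≤ S := by
      by_contra h
      push_neg at h
      have : S * n ≤ 0 := mul_nonpos_of_nonpos_of_nonneg (by omega) (by omega)
      have : ((x :: xs).length : Int) ≤ 0 := le_trans hub this
      simp only [List.length_cons] at this
      omega
    -- write S as ↑(s+1)
    obtain ⟨s, hs⟩ : ∃ s : Nat, S = (s : Int) + 1 := ⟨(S - 1).toNat, by omega⟩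
    have hbe : -(PySem.Int.floordiv (-((x :: xs).length : Int)) n) = S := by
      rw [hS]; exact b_size_eq _ n hpre hL
    simp only [if_neg (List.cons_ne_nil x xs)]
    rw [hbe, hs]
    rw [foldl_eq_aRun ((s : Int) + 1) (x :: xs) [] []]
    rw [b_map_eq_chunks s (x :: xs) (List.cons_ne_nil x xs)]
    -- A side: aRun from empty bucket equals chunks
    have hstep : aRun ((s : Int) + 1) [] (x :: xs) = aRun ((s : Int) + 1) [x] xs := by
      rw [aRun]
      simp
    rw [List.nil_append, hstep, aRun_eq_chunks s xs [x] (by simp) (by simp only [List.length_cons, List.length_nil]; omega)]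
    rw [chunks_cons]
    simp
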